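-- pv_equiv track=rewrite | github.com/ManinderGharuan/beginners-programming-course | assignments/assignment6.py | pick_best_word
-- ===== SOURCE A (Python) =====
-- def display_hand(hand):
--     """Displays the letters currently in the hand."""
--     display_hand = ""
--
--     for letter in hand.keys():
--         for j in range(hand[letter]):
--             display_hand += letter + " "
--
--     return display_hand.strip()
--
-- def is_hand_in_dict(str_hand, key):
--     check_str = key
--
--     for i in str_hand:
--         if check_str.find(i) >= 0:
--             check_str = check_str.replace(i, '', 1)
--
--     if check_str != '':
--         return False
--     else:
--         return True
--
-- def pick_best_word(hand, points_dict):
--     """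
--     Returns highest scoring word from ~points_dict~
--     that can be made with given ~hand~
--     """
--     str_hand = display_hand(hand)
--     best_words = {}
--
--     for key in points_dict.keys():
--         if is_hand_in_dict(str_hand, key):
--             best_words[key] = points_dict.get(key)
--
--     if best_words == {}:
--         return '.'
--
--     return max(best_words)
-- ===== SOURCE B (Python) =====
-- def display_hand(hand):
--     """Displays the letters currently in the hand."""
--     display_hand = ""
--
--     for letter in hand.keys():
--         for j in range(hand[letter]):
--             display_hand += letter + " "
--
--     return display_hand.strip()
--
-- def pick_best_word(hand, points_dict):
--     """
--     Returns highest scoring word from ~points_dict~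
--     that can be made with given ~hand~
--     """
--     tiles = {}
--     for c in display_hand(hand):
--         tiles[c] = tiles.get(c, 0) + 1
--
--     for word in sorted(points_dict, reverse=True):
--         need = {}
--         for c in word:
--             need[c] = need.get(c, 0) + 1
--         if all(need[c] <= tiles.get(c, 0) for c in need):
--             return word
--
--     return '.'
-- ===== Notes on version B (the rewrite author's own statement) =====
-- stated objective: faster
-- what changed: A tests each word by destructively find/replace-ing the hand string through a scratch copy, collects every makeable word into a dict and then takes max; B counts the displayed hand's characters into one tile counter, sorts the dictionary words in descending order and returns the first word whose own character counts fit under the tile counter (early exit, multiset comparison instead of string surgery).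
import Mathlib
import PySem

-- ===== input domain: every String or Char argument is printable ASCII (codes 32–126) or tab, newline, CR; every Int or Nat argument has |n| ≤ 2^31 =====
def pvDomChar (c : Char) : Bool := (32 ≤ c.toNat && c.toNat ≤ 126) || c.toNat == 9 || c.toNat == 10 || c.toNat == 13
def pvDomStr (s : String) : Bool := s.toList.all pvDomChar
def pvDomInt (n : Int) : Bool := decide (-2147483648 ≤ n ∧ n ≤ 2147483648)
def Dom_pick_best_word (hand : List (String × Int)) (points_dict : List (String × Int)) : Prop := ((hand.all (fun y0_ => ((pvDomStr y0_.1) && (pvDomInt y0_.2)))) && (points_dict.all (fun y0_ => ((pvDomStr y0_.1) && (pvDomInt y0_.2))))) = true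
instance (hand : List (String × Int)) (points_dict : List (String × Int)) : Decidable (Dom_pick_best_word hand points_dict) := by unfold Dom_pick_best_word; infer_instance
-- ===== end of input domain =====

-- B replaces A's "collect all makeable words, then max" with "sort words descending, return the
-- first one whose character counts fit under a tile counter of the displayed hand" (early exit),
-- instead of A's per-word find/replace destruction of a scratch string.

-- ===== PORT A =====
-- display_hand(hand): concatenate each letter followed by ' ', hand[letter] times, then strip.
-- (the module's shared helper; Source B calls it too)
def pv_display_hand (hand : PySem.Dict String Int) : List Char :=
  PySem.Chars.strip
    (hand.keys.foldl (fun acc letter =>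
      (PySem.List.pyRange 0 ((hand.get? letter).getD 0) 1).foldl
        (fun acc2 _ => acc2 ++ letter.toList ++ [' ']) acc) [])
-- hand[letter] is looked up on a key of hand, so get? is always `some`; `.getD 0` only names the value.

-- is_hand_in_dict(str_hand, key): destructively cancel each char of str_hand out of a copy of key.
-- check_str.replace(i, '', 1) for the single char i removes its first occurrence: List.erase is exact.
def pvA_is_hand_in_dict (str_hand : List Char) (key : List Char) : Bool :=
  let check := str_hand.foldl (fun check i =>
      if 0 ≤ PySem.Chars.find check [i] then check.erase i else check) key
  if check ≠ [] then false else true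

def pick_best_word (hand : List (String × Int)) (points_dict : List (String × Int)) : String :=
  let handD := PySem.Dict.ofList hand
  let pdD := PySem.Dict.ofList points_dict
  let str_hand := pv_display_hand handD
  let best_words : PySem.Dict String Int :=
    pdD.keys.foldl (fun bw key =>
      if pvA_is_hand_in_dict str_hand key.toList then bw.insert key (pdD.getD key 0) else bw)
      PySem.Dict.empty
  -- points_dict.get(key) with key a key of points_dict: the value; `.getD 0` only names it.
  if best_words.items = [] then "."       -- best_words == {}
  else (PySem.List.max? best_words.keys (fun k => k)).getD "."   -- max(best_words): nonempty here

-- ===== PORT B =====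
-- Source B's per-word test: count the word's characters into `need`, then all(need[c] <= tiles.get(c,0))
def pvB_fits (tiles : PySem.Dict Char Int) (word : List Char) : Bool :=
  let need := word.foldl (fun d c => d.insert c (d.getD c 0 + 1)) (PySem.Dict.empty : PySem.Dict Char Int)
  need.keys.all (fun c => need.getD c 0 ≤ tiles.getD c 0)

-- Source B's word loop: first fitting word of the descending-sorted word list, else '.'
def pvB_find (tiles : PySem.Dict Char Int) : List String → String
  | [] => "."
  | w :: rest => if pvB_fits tiles w.toList then w else pvB_find tiles rest

def pick_best_word_alt (hand : List (String × Int)) (points_dict : List (String × Int)) : String :=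
  let tiles := (pv_display_hand (PySem.Dict.ofList hand)).foldl
    (fun d c => d.insert c (d.getD c 0 + 1)) (PySem.Dict.empty : PySem.Dict Char Int)
  pvB_find tiles (PySem.List.sorted (PySem.Dict.ofList points_dict).keys (fun k => k) true)

-- ===== PRECONDITION & SPEC =====
def Spec_pick_best_word (hand : List (String × Int)) (points_dict : List (String × Int)) (out : String) : Prop := out = pick_best_word_alt hand points_dict
instance (hand : List (String × Int)) (points_dict : List (String × Int)) (out : String) : Decidable (Spec_pick_best_word hand points_dict out) := by unfold Spec_pick_best_word; infer_instance

-- ===== CLAIM (what is proved, stated in full; the proofs are below) =====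
def Claim_equal_pick_best_word : Prop := ∀ (hand : List (String × Int)) (points_dict : List (String × Int)), Dom_pick_best_word hand points_dict → Spec_pick_best_word hand points_dict (pick_best_word hand points_dict)

-- ===== LEMMAS AND PROOFS =====

-- count in A's cancellation fold
lemma pvA_fold_count (s : List Char) : ∀ (t : List Char) (c : Char),
    (s.foldl (fun check i =>
        if 0 ≤ PySem.Chars.find check [i] then check.erase i else check) t).count c
      = t.count c - min (t.count c) (s.count c) := by
  induction s with
  | nil => intro t c; simp
  | cons i s' ih =>
      intro t c
      simp only [List.foldl_cons]
      by_cases hmem : i ∈ t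
      · rw [if_pos (by rw [PySem.Chars.find_nonneg_iff, List.singleton_infix_iff]; exact hmem),
          ih]
        by_cases hc : c = i
        · subst hc
          have h1 : (t.erase c).count c = t.count c - 1 := by
            simp [List.count_erase_self]
          have h2 : 1 ≤ t.count c := List.one_le_count_iff.mpr hmem
          simp only [h1, List.count_cons_self]
          omega
        · rw [List.count_erase_of_ne hc]
          have hic : ¬ i = c := fun h => hc h.symm
          simp [hic]
      · rw [if_neg (by rw [not_le, ← not_le, PySem.Chars.find_nonneg_iff, List.singleton_infix_iff]; simpa using hmem), ih]
        by_cases hc : c = i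
        · subst hc
          have : t.count c = 0 := List.count_eq_zero.mpr hmem
          simp [this]
        · have hic : ¬ i = c := fun h => hc h.symm
          simp [hic]

-- A's makeability test is the multiset comparison
lemma pvA_test_iff (s k : List Char) :
    pvA_is_hand_in_dict s k = true ↔ ∀ c, k.count c ≤ s.count c := by
  have hnil : ∀ (l : List Char), l = [] ↔ ∀ c, l.count c = 0 := by
    intro l
    constructor
    · rintro rfl c; simp
    · intro h
      cases l with
      | nil => rfl
      | cons a t => have := h a; simp at this
  have hiff : (s.foldl (fun check i =>
      if 0 ≤ PySem.Chars.find check [i] then check.erase i else check) k) = []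
      ↔ ∀ c, k.count c ≤ s.count c := by
    rw [hnil]
    constructor
    · intro h c; have := h c; rw [pvA_fold_count] at this; omega
    · intro h c; rw [pvA_fold_count]; have := h c; omega
  simp only [pvA_is_hand_in_dict, ne_eq, ite_not]
  split_ifs with h
  · simp only [true_iff] at *
    exact hiff.mp h
  · simp only [false_iff] at *
    exact fun hh => h (hiff.mpr hh)

-- B's counter test is the same multiset comparison (tiles built by the counting fold over disp)
lemma pvB_fits_iff (disp : List Char) (w : List Char) :
    pvB_fits (disp.foldl (fun d c => d.insert c (d.getD c 0 + 1)) PySem.Dict.empty) w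
      = true ↔ ∀ c, w.count c ≤ disp.count c := by
  have htiles : ∀ c, (disp.foldl (fun d c => d.insert c (d.getD c 0 + 1))
      (PySem.Dict.empty : PySem.Dict Char Int)).getD c 0 = (disp.count c : Int) := by
    intro c
    rw [PySem.Dict.getD_foldl_insert_add_one, PySem.Dict.getD_empty]
    simp
  have hneed : ∀ c, ((w.foldl (fun d c => d.insert c (d.getD c 0 + 1))
      (PySem.Dict.empty : PySem.Dict Char Int)).getD c 0) = (w.count c : Int) := by
    intro c
    rw [PySem.Dict.getD_foldl_insert_add_one, PySem.Dict.getD_empty]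
    simp
  have hkeys : (w.foldl (fun d c => d.insert c (d.getD c 0 + 1))
      (PySem.Dict.empty : PySem.Dict Char Int)).keys = PySem.Set.ofList w := by
    rw [PySem.Dict.keys_foldl_insert, PySem.Dict.keys_empty]
    rfl
  unfold pvB_fits
  simp only [hkeys, List.all_eq_true, hneed, htiles, decide_eq_true_eq]
  constructor
  · intro h c
    by_cases hc : c ∈ w
    · have := h c (by rw [PySem.Set.mem_ofList]; exact hc)
      exact_mod_cast this
    · rw [List.count_eq_zero.mpr hc]; exact Nat.zero_le _
  · intro h c _
    exact_mod_cast h c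

-- keys of A's best_words dict: the filtered key list, in order
lemma pv_bw_keys (P : String → Bool) (pdD : PySem.Dict String Int) (K : List String) :
    ∀ (d : PySem.Dict String Int), K.Nodup → (∀ k ∈ K, d.contains k = false) →
      (K.foldl (fun bw key => if P key then bw.insert key (pdD.getD key 0) else bw) d).keys
        = d.keys ++ K.filter P := by
  induction K with
  | nil => intro d _ _; simp
  | cons k K' ih =>
      intro d hnd hfresh
      simp only [List.foldl_cons]
      by_cases hp : P k
      · rw [if_pos hp]
        have hkeys := PySem.Dict.keys_insert_of_not_contains d (pdD.getD k 0)
          (hfresh k (by simp))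
        rw [ih _ hnd.of_cons (by
          intro k' hk'
          rw [PySem.Dict.contains_insert]
          have hne : k' ≠ k := by rintro rfl; exact (List.nodup_cons.mp hnd).1 hk'
          simp [hne, hfresh k' (by simp [hk'])]), hkeys]
        simp [hp]
      · rw [if_neg hp, ih _ hnd.of_cons (fun k' hk' => hfresh k' (by simp [hk']))]
        simp [hp]

-- first hit in the descending sort = max of the filtered list
lemma pv_find_sorted_eq_max (K : List String) (P : String → Bool) :
    (PySem.List.sorted K (fun k => k) true).find? P = PySem.List.max? (K.filter P) (fun k => k) := by
  have hperm := PySem.List.sorted_perm K (fun k => k) true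
  have hpw := PySem.List.sorted_pairwise_rev K (fun k => k)
  have hfp : ((PySem.List.sorted K (fun k => k) true).filter P).Perm (K.filter P) :=
    List.Perm.filter P hperm
  cases hfil : (PySem.List.sorted K (fun k => k) true).filter P with
  | nil =>
      have hKfil : K.filter P = [] := List.Perm.nil_eq ((hfil ▸ hfp)) |>.symm
      rw [hKfil]
      rw [List.find?_eq_none.mpr]
      · rfl
      · intro x hx hpx
        have : x ∈ (PySem.List.sorted K (fun k => k) true).filter P :=
          List.mem_filter.mpr ⟨hx, hpx⟩
        rw [hfil] at this
        exact absurd this (by simp)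
  | cons m rest =>
      have hfind : (PySem.List.sorted K (fun k => k) true).find? P = some m := by
        rw [← List.head?_filter, hfil]; rfl
      have hm_mem : m ∈ K.filter P := (hfil ▸ hfp).mem_iff.mp (List.mem_cons_self)
      have hpwf : ((PySem.List.sorted K (fun k => k) true).filter P).Pairwise
          (fun a b => b ≤ a) := List.Pairwise.filter P hpw
      rw [hfil] at hpwf
      have hmax_all : ∀ y ∈ K.filter P, y ≤ m := by
        intro y hy
        have hyS : y ∈ m :: rest := (hfil ▸ hfp).mem_iff.mpr hy
        rcases List.mem_cons.mp hyS with h | h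
        · exact h ▸ le_refl _
        · exact (List.pairwise_cons.mp hpwf).1 y h
      obtain ⟨m', hm'⟩ : ∃ m', PySem.List.max? (K.filter P) (fun k => k) = some m' := by
        cases hmx : PySem.List.max? (K.filter P) (fun k => k) with
        | none =>
            rw [PySem.List.max?_eq_none_iff] at hmx
            rw [hmx] at hm_mem
            exact absurd hm_mem (by simp)
        | some v => exact ⟨v, rfl⟩
      have h1 : m ≤ m' := PySem.List.max?_isMax hm' m hm_mem
      have h2 : m' ≤ m := hmax_all m' (PySem.List.max?_mem hm')
      rw [hfind, hm', le_antisymm h2 h1]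

-- pvB_find is find? with default '.'
lemma pvB_find_eq (tiles : PySem.Dict Char Int) (l : List String) :
    pvB_find tiles l = ((l.find? (fun w => pvB_fits tiles w.toList)).getD ".") := by
  induction l with
  | nil => rfl
  | cons k rest ih =>
      simp only [pvB_find, List.find?]
      by_cases hp : pvB_fits tiles k.toList
      · simp [hp]
      · simp [hp, ih]

-- ===== VERDICT (by name: the statement is the Claim_ definition above) =====
theorem pick_best_word_spec : Claim_equal_pick_best_word := by
  unfold Claim_equal_pick_best_word
  intro hand pd _
  unfold Spec_pick_best_word pick_best_word pick_best_word_alt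
  simp only []
  set pdD := PySem.Dict.ofList pd with hpdD
  set hD := PySem.Dict.ofList hand with hhD
  set disp := pv_display_hand hD with hdisp
  set tiles : PySem.Dict Char Int := disp.foldl (fun d c => d.insert c (d.getD c 0 + 1)) PySem.Dict.empty
    with htiles0
  -- the two makeability tests agree
  have hP : ∀ k : String,
      pvA_is_hand_in_dict disp k.toList = pvB_fits tiles k.toList := by
    intro k
    rw [Bool.eq_iff_iff, pvA_test_iff, htiles0, pvB_fits_iff]
  -- keys of A's best_words dict
  have hbw := pv_bw_keys (fun key => pvA_is_hand_in_dict disp key.toList) pdD pdD.keys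
    PySem.Dict.empty (PySem.Dict.nodup_keys_ofList pd)
    (by intro k _; exact PySem.Dict.contains_empty k)
  rw [PySem.Dict.keys_empty, List.nil_append] at hbw
  -- B's side: find over the descending sort = max of the filter
  rw [pvB_find_eq, pv_find_sorted_eq_max]
  have hfilter_eq : pdD.keys.filter (fun k => pvB_fits tiles k.toList)
      = pdD.keys.filter (fun key => pvA_is_hand_in_dict disp key.toList) := by
    apply List.filter_congr
    intro k _
    exact (hP k).symm
  rw [hfilter_eq]
  -- A's empty-dict test is "no makeable key"
  set bw := pdD.keys.foldl (fun bw key =>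
      if pvA_is_hand_in_dict disp key.toList then bw.insert key (pdD.getD key 0) else bw)
    PySem.Dict.empty with hbwdef
  have hkeys_items : bw.items = [] ↔ bw.keys = [] := by
    constructor
    · intro h; simp [PySem.Dict.keys, h]
    · intro h
      have h2 : (bw.items.map Prod.fst) = [] := by
        simpa [PySem.Dict.keys] using h
      exact List.map_eq_nil_iff.mp h2
  by_cases hnil : pdD.keys.filter (fun key => pvA_is_hand_in_dict disp key.toList) = []
  · rw [if_pos (hkeys_items.mpr (hbw.trans hnil)), hnil,
      show PySem.List.max? ([] : List String) (fun k => k) = none from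
        (PySem.List.max?_eq_none_iff _ _).mpr rfl]
    rfl
  · rw [if_neg (fun h => hnil (hbw.symm.trans (hkeys_items.mp h))), hbw]
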